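-- pv_equiv track=rewrite | github.com/kh277/BOJ | 백준/Silver/17615. 볼 모으기/볼 모으기.py | solve
-- ===== SOURCE A (Python) =====
-- INF = 10**8
--
-- def solve(N, ball):
--     result = INF
--     ballType = ['B', 'R']
--
--     for curBall in range(2):
--         # 오른쪽에서 처음 공 색이 바뀌는 곳 체크
--         rightStart = None
--         for i in range(N-1, -1, -1):
--             if ball[i] == ballType[curBall]:
--                 rightStart = i
--                 break
--         # 오른쪽 끝의 공 색을 전부 오른쪽으로 밀기
--         resultA = 0
--         if rightStart != None:
--             for i in range(rightStart, -1, -1):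
--                 if ball[i] == ballType[curBall^1]:
--                     resultA += 1
--         result = min(result, resultA)
--
--         # 왼쪽에서 처음 공 색이 바뀌는 곳 체크
--         leftStart = None
--         for i in range(N):
--             if ball[i] == ballType[curBall^1]:
--                 leftStart = i
--                 break
--         # 왼쪽 끝의 공 색을 전부 왼쪽으로 밀기
--         resultB = 0
--         if leftStart != None:
--             for i in range(leftStart, N):
--                 if ball[i] == ballType[curBall]:
--                     resultB += 1
--         result = min(result, resultB)
--
--     return result
-- ===== SOURCE B (Python) =====
-- INF = 10**8
--
-- def _lt(a, x):
--     # number of elements of the sorted list a that are strictly less than x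
--     # (hand-rolled bisect_left, since A imports nothing)
--     lo, hi = 0, len(a)
--     while lo < hi:
--         mid = (lo + hi) // 2
--         if a[mid] < x:
--             lo = mid + 1
--         else:
--             hi = mid
--     return lo
--
-- def solve(N, ball):
--     # Build sorted index lists of each colour in one pass, then answer the
--     # four "balls of one colour beyond the boundary of the other" queries by
--     # binary search on those lists instead of re-scanning segments.
--     xs = ball[:N] if N > 0 else []
--     posB, posR = [], []
--     for i, x in enumerate(xs):
--         if x == 'B':
--             posB.append(i)
--         elif x == 'R':
--             posR.append(i)
--     best = INF
--     for pc, po in ((posB, posR), (posR, posB)):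
--         resA = _lt(po, pc[-1]) if pc else 0          # opposite balls left of last c
--         resB = len(pc) - _lt(pc, po[0]) if po else 0 # c balls right of first opposite
--         best = min(best, resA, resB)
--     return best
-- ===== Notes on version B (the rewrite author's own statement) =====
-- stated objective: alternative
-- what changed: A finds each boundary with a directional index scan and then re-scans that segment counting the other colour; B instead builds a sorted position list per colour in one enumerate pass and answers all four boundary-count queries by hand-rolled binary search (bisect_left), so no segment is ever re-scanned.
import Mathlib
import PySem

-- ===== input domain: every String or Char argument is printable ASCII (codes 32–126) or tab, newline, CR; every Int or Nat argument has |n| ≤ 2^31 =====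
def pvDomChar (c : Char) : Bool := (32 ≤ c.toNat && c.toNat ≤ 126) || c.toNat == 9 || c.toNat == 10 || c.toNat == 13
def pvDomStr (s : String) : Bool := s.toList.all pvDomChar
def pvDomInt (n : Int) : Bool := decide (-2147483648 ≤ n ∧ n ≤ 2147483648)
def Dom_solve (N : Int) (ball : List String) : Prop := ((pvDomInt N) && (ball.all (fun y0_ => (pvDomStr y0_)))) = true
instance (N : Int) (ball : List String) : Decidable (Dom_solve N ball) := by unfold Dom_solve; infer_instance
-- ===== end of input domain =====

-- B replaces A's find-boundary-then-count segment scans by one indexing pass that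
-- records each colour's sorted position list, answering the four boundary counts by
-- hand-rolled binary search (bisect_left); objective: alternative.

-- ===== PORT A =====
def solve (N : Int) (ball : List String) : Int :=
  let INF : Int := 10 ^ 8
  let ballType : List String := ["B", "R"]
  (List.range 2).foldl (fun result curBall =>
    let c := ballType.getD curBall ""
    let opp := ballType.getD (curBall ^^^ 1) ""
    -- rightStart: first i from N-1 down to 0 with ball[i] == c (break)
    let rightStart := (PySem.List.pyRange (N - 1) (-1) (-1)).find?
        (fun i => PySem.List.pyGetD ball i "" == c)
    let resultA : Int := match rightStart with
      | none => 0
      | some rs => (PySem.List.pyRange rs (-1) (-1)).foldl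
          (fun acc i => if PySem.List.pyGetD ball i "" == opp then acc + 1 else acc) 0
    let result := min result resultA
    -- leftStart: first i from 0 up with ball[i] == opp (break)
    let leftStart := (PySem.List.pyRange 0 N 1).find?
        (fun i => PySem.List.pyGetD ball i "" == opp)
    let resultB : Int := match leftStart with
      | none => 0
      | some ls => (PySem.List.pyRange ls N 1).foldl
          (fun acc i => if PySem.List.pyGetD ball i "" == c then acc + 1 else acc) 0
    min result resultB) INF

-- ===== PORT B =====
-- _lt(a, x): bisect_left loop; a[mid] is always in range (lo < hi ≤ len a), so getD is exact
def ltGo (a : List Int) (x : Int) (lo hi : Nat) : Nat :=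
  if _h : lo < hi then
    let mid := (lo + hi) / 2
    if a.getD mid 0 < x then ltGo a x (mid + 1) hi else ltGo a x lo mid
  else lo
termination_by hi - lo
decreasing_by all_goals omega

def ltCount (a : List Int) (x : Int) : Nat := ltGo a x 0 a.length

def solve_alt (N : Int) (ball : List String) : Int :=
  let xs := if 0 < N then PySem.List.slice ball none (some N) else []
  -- one enumerate pass building the sorted position list of each colour
  let ps := (PySem.List.enumerate xs 0).foldl
      (fun (acc : List Int × List Int) p =>
        if p.2 == "B" then (acc.1 ++ [p.1], acc.2)
        else if p.2 == "R" then (acc.1, acc.2 ++ [p.1])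
        else acc) ([], [])
  let posB := ps.1
  let posR := ps.2
  -- loop over ((posB,posR),(posR,posB)): resA = _lt(po, pc[-1]) if pc else 0, …
  let resA1 : Int := match posB.getLast? with
    | none => 0
    | some lb => (ltCount posR lb : Int)
  let resB1 : Int := match posR.head? with
    | none => 0
    | some f => (posB.length : Int) - (ltCount posB f : Int)
  let resA2 : Int := match posR.getLast? with
    | none => 0
    | some lb => (ltCount posB lb : Int)
  let resB2 : Int := match posB.head? with
    | none => 0
    | some f => (posR.length : Int) - (ltCount posR f : Int)
  min (min (min (min ((10 : Int) ^ 8) resA1) resB1) resA2) resB2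

-- ===== PRECONDITION & SPEC =====
-- A indexes ball[i] for i up to N-1, so it raises IndexError exactly when N > len(ball).
def Pre_solve (N : Int) (ball : List String) : Prop := N ≤ (ball.length : Int)
instance (N : Int) (ball : List String) : Decidable (Pre_solve N ball) := by
  unfold Pre_solve; infer_instance

def pvWitness_solve : Int × List String := (3, ["R", "B", "R"])

def Spec_solve (N : Int) (ball : List String) (out : Int) : Prop := out = solve_alt N ball
instance (N : Int) (ball : List String) (out : Int) : Decidable (Spec_solve N ball out) := by
  unfold Spec_solve; infer_instance

-- ===== CLAIM (what is proved, stated in full; the proofs are below) =====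
def Claim_equal_solve : Prop := ∀ (N : Int) (ball : List String),
  Dom_solve N ball → Pre_solve N ball → Spec_solve N ball (solve N ball)

-- ===== LEMMAS AND PROOFS =====

-- A's two scan-then-count passes, as standalone functions (proof-side only)
def leftA (ball : List String) (N : Int) (c o : String) : Int :=
  match (PySem.List.pyRange 0 N 1).find? (fun i => PySem.List.pyGetD ball i "" == o) with
  | none => 0
  | some ls => (PySem.List.pyRange ls N 1).foldl
      (fun acc i => if PySem.List.pyGetD ball i "" == c then acc + 1 else acc) 0

def rightA (ball : List String) (N : Int) (c o : String) : Int :=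
  match (PySem.List.pyRange (N - 1) (-1) (-1)).find? (fun i => PySem.List.pyGetD ball i "" == c) with
  | none => 0
  | some rs => (PySem.List.pyRange rs (-1) (-1)).foldl
      (fun acc i => if PySem.List.pyGetD ball i "" == o then acc + 1 else acc) 0

theorem solve_unfold (N : Int) (ball : List String) :
    solve N ball =
      min (min (min (min ((10 : Int) ^ 8) (rightA ball N "B" "R")) (leftA ball N "B" "R"))
          (rightA ball N "R" "B")) (leftA ball N "R" "B") := by
  rfl

theorem find?_congr_mem {α : Type} (l : List α) (p q : α → Bool)
    (h : ∀ a ∈ l, p a = q a) : l.find? p = l.find? q := by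
  induction l with
  | nil => rfl
  | cons x t ih =>
    simp only [List.find?_cons]
    rw [h x (by simp)]
    cases hq : q x with
    | true => rfl
    | false => exact ih (fun a ha => h a (by simp [ha]))

theorem range_find_eq_findIdx (xs : List String) (o : String) :
    (List.range xs.length).find? (fun k => xs.getD k "" == o) = xs.findIdx? (fun x => x == o) := by
  induction xs with
  | nil => rfl
  | cons x t ih =>
    simp only [List.length_cons, List.range_succ_eq_map, List.find?_cons, List.findIdx?_cons]
    cases hx : (x == o) with
    | true => simp [hx]
    | false =>
      simp only [List.getD_cons_zero, hx, List.find?_map]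
      have hp : ((fun k => (x :: t).getD k "" == o) ∘ Nat.succ) = (fun k => t.getD k "" == o) := by
        funext k; simp
      rw [hp, ih]
      rfl

theorem map_getD_range_take (xs : List String) (m : Nat) (h : m ≤ xs.length) :
    (List.range m).map (fun k => xs.getD k "") = xs.take m := by
  apply List.ext_getElem
  · simp [h]
  · intro i h1 h2
    have him : i < m := by simpa using h1
    simp [List.getD_eq_getElem?_getD, List.getElem?_eq_getElem (by omega : i < xs.length)]

theorem leftA_char (ball : List String) (N : Int) (c o : String)
    (h0 : 0 ≤ N) (h1 : N ≤ (ball.length : Int)) :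
    leftA ball N c o =
      match (ball.take N.toNat).findIdx? (fun x => x == o) with
      | none => 0
      | some j => (((ball.take N.toNat).drop j).count c : Int) := by
  have hN : ((N.toNat : Nat) : Int) = N := Int.toNat_of_nonneg h0
  set n := N.toNat with hn
  set xs := ball.take n with hxs
  have hnb : n ≤ ball.length := by omega
  have hlen : xs.length = n := by simp [hxs, List.length_take]; omega
  have hgd : ∀ i : Int, 0 ≤ i → i < N →
      PySem.List.pyGetD ball i "" = PySem.List.pyGetD xs i "" := by
    intro i hi1 hi2
    have hi3 : i < (xs.length : Int) := by omega
    have hi4 : i < (ball.length : Int) := by omega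
    rw [PySem.List.pyGetD_eq_getElem ball "" hi1 hi4, PySem.List.pyGetD_eq_getElem xs "" hi1 hi3]
    simp only [hxs]
    rw [List.getElem_take]
  unfold leftA
  have hfind : (PySem.List.pyRange 0 N 1).find? (fun i => PySem.List.pyGetD ball i "" == o)
      = (xs.findIdx? (fun x => x == o)).map (fun k : Nat => (k : Int)) := by
    rw [find?_congr_mem _ _ (fun i => PySem.List.pyGetD xs i "" == o)
      (by intro a ha
          rw [PySem.List.mem_pyRange_one] at ha
          rw [hgd a ha.1 ha.2])]
    rw [← hN, PySem.List.pyRange_zero_natCast, List.find?_map]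
    have hcomp : ((fun i => PySem.List.pyGetD xs i "" == o) ∘ (fun k : Nat => (k : Int)))
        = (fun k : Nat => xs.getD k "" == o) := by
      funext k; simp
    rw [hcomp, ← hlen, range_find_eq_findIdx]
  rw [hfind]
  cases hfi : xs.findIdx? (fun x => x == o) with
  | none => simp
  | some j =>
    simp only [Option.map_some]
    have hj : j < n := by
      have := (List.findIdx?_eq_some_iff_findIdx_eq.mp hfi).1
      omega
    have hcongr : (PySem.List.pyRange (j : Int) N 1).foldl
          (fun (acc : Int) i => if PySem.List.pyGetD ball i "" == c then acc + 1 else acc) 0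
        = (PySem.List.pyRange (j : Int) N 1).foldl
          (fun (acc : Int) i => if PySem.List.pyGetD xs i "" == c then acc + 1 else acc) 0 := by
      apply PySem.List.foldl_congr_mem
      intro acc x hx
      rw [PySem.List.mem_pyRange_one] at hx
      rw [hgd x (by omega) hx.2]
    refine hcongr.trans ?_
    rw [← hN, ← hlen,
      PySem.List.foldl_pyRange_pyGetD' xs "" (fun acc e => if e == c then acc + 1 else acc) 0
        (Int.natCast_nonneg j),
      PySem.List.foldl_beq_add_one]
    simp

theorem rightA_char (ball : List String) (N : Int) (c o : String)
    (h0 : 0 ≤ N) (h1 : N ≤ (ball.length : Int)) :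
    rightA ball N c o =
      match (ball.take N.toNat).reverse.findIdx? (fun x => x == c) with
      | none => 0
      | some j => (((ball.take N.toNat).reverse.drop j).count o : Int) := by
  have hN : ((N.toNat : Nat) : Int) = N := Int.toNat_of_nonneg h0
  set n := N.toNat with hn
  set xs := ball.take n with hxs
  have hnb : n ≤ ball.length := by omega
  have hlen : xs.length = n := by simp [hxs, List.length_take]; omega
  have hrevlen : xs.reverse.length = n := by simp [hlen]
  have hgd : ∀ i : Int, 0 ≤ i → i < N →
      PySem.List.pyGetD ball i "" = PySem.List.pyGetD xs i "" := by
    intro i hi1 hi2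
    have hi3 : i < (xs.length : Int) := by omega
    have hi4 : i < (ball.length : Int) := by omega
    rw [PySem.List.pyGetD_eq_getElem ball "" hi1 hi4, PySem.List.pyGetD_eq_getElem xs "" hi1 hi3]
    simp only [hxs]
    rw [List.getElem_take]
  unfold rightA
  have hfind : (PySem.List.pyRange (N - 1) (-1) (-1)).find?
        (fun i => PySem.List.pyGetD ball i "" == c)
      = (xs.reverse.findIdx? (fun x => x == c)).map (fun j : Nat => ((n - 1 - j : Nat) : Int)) := by
    have hr : PySem.List.pyRange (N - 1) (-1) (-1) = (PySem.List.pyRange 0 N 1).reverse := by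
      rw [PySem.List.pyRange_neg_one_eq_reverse]
      norm_num
    rw [hr]
    rw [find?_congr_mem _ _ (fun i => PySem.List.pyGetD xs i "" == c)
      (by intro a ha
          rw [List.mem_reverse, PySem.List.mem_pyRange_one] at ha
          rw [hgd a ha.1 ha.2])]
    rw [← hN, PySem.List.pyRange_zero_natCast, ← List.map_reverse, List.find?_map]
    have hrev : (List.range n).reverse = (List.range n).map (fun k => n - 1 - k) := by
      conv_lhs => rw [List.range_eq_range']
      rw [List.reverse_range']
      simp
    rw [hrev, List.find?_map]
    have hcomp : (((fun i => PySem.List.pyGetD xs i "" == c) ∘ (fun k : Nat => (k : Int)))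
        ∘ (fun k : Nat => n - 1 - k)) = (fun k : Nat => xs.getD (n - 1 - k) "" == c) := by
      funext k; simp
    rw [hcomp]
    rw [find?_congr_mem _ _ (fun k : Nat => xs.reverse.getD k "" == c)
      (by intro k hk
          show (xs.getD (n - 1 - k) "" == c) = (xs.reverse.getD k "" == c)
          rw [List.mem_range] at hk
          have h1k : n - 1 - k < xs.length := by omega
          have h2k : k < xs.reverse.length := by omega
          rw [List.getD_eq_getElem _ _ h1k, List.getD_eq_getElem _ _ h2k,
            List.getElem_reverse]
          congr 2
          omega)]
    conv_lhs => rw [← hrevlen]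
    rw [range_find_eq_findIdx]
    simp only [Option.map_map, hrevlen]
    rfl
  rw [hfind]
  cases hfi : xs.reverse.findIdx? (fun x => x == c) with
  | none => simp
  | some j =>
    simp only [Option.map_some]
    have hj : j < n := by
      have := (List.findIdx?_eq_some_iff_findIdx_eq.mp hfi).1
      omega
    have hr2 : PySem.List.pyRange ((n - 1 - j : Nat) : Int) (-1) (-1)
        = (PySem.List.pyRange 0 ((n - j : Nat) : Int) 1).reverse := by
      rw [PySem.List.pyRange_neg_one_eq_reverse]
      have h3 : ((n - 1 - j : Nat) : Int) + 1 = ((n - j : Nat) : Int) := by omega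
      rw [show (-1 + 1 : Int) = (0 : Int) from by norm_num, h3]
    rw [hr2]
    have hcongr : ((PySem.List.pyRange 0 ((n - j : Nat) : Int) 1).reverse).foldl
          (fun (acc : Int) i => if PySem.List.pyGetD ball i "" == o then acc + 1 else acc) 0
        = ((PySem.List.pyRange 0 ((n - j : Nat) : Int) 1).reverse).foldl
          (fun (acc : Int) i => if PySem.List.pyGetD xs i "" == o then acc + 1 else acc) 0 := by
      apply PySem.List.foldl_congr_mem
      intro acc x hx
      rw [List.mem_reverse, PySem.List.mem_pyRange_one] at hx
      have : x < N := by omega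
      rw [hgd x hx.1 this]
    refine hcongr.trans ?_
    refine ((List.foldl_map (f := fun i => PySem.List.pyGetD xs i "")
      (g := fun acc e => if e == o then acc + 1 else acc)
      (l := (PySem.List.pyRange 0 ((n - j : Nat) : Int) 1).reverse) (init := 0)).symm).trans ?_
    rw [List.map_reverse, PySem.List.pyRange_zero_natCast, List.map_map]
    rw [show ((fun i => PySem.List.pyGetD xs i "") ∘ (fun k : Nat => (k : Int)))
        = (fun k : Nat => xs.getD k "") from by funext k; simp]
    rw [map_getD_range_take xs (n - j) (by omega)]
    rw [PySem.List.foldl_beq_add_one]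
    have hrt : (xs.take (n - j)).reverse = xs.reverse.drop j := by
      rw [List.reverse_take]
      congr 1
      omega
    rw [hrt]
    simp

-- ===== B-side lemmas: position lists and binary search =====

-- proof-side: the sorted list of (Int) indices of colour c in xs, starting at offset s
def idxsI (xs : List String) (s : Int) (c : String) : List Int :=
  match xs with
  | [] => []
  | x :: t => (if x == c then [s] else []) ++ idxsI t (s + 1) c

theorem mem_idxsI (xs : List String) (s : Int) (c : String) (p : Int) :
    p ∈ idxsI xs s c ↔ ∃ k : Nat, k < xs.length ∧ p = s + k ∧ xs.getD k "" = c := by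
  induction xs generalizing s with
  | nil => simp [idxsI]
  | cons x t ih =>
    simp only [idxsI, List.mem_append, ih]
    constructor
    · rintro (h1 | ⟨k, hk, rfl, hc⟩)
      · by_cases hx : (x == c) = true
        · rw [if_pos hx] at h1
          simp only [List.mem_singleton] at h1
          exact ⟨0, by simp, by simp [h1], by simpa using hx⟩
        · rw [if_neg hx] at h1; simp at h1
      · exact ⟨k + 1, by simpa using hk, by push_cast; ring, by simpa using hc⟩
    · rintro ⟨k, hk, rfl, hc⟩
      cases k with
      | zero =>
        left
        have hx : (x == c) = true := by simpa using hc
        simp [hx]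
      | succ k =>
        right
        exact ⟨k, by simpa using hk, by push_cast; ring, by simpa using hc⟩

theorem length_idxsI (xs : List String) (s : Int) (c : String) :
    (idxsI xs s c).length = xs.count c := by
  induction xs generalizing s with
  | nil => rfl
  | cons x t ih =>
    by_cases hx : (x == c) = true
    · simp [idxsI, hx, List.count_cons, ih]
    · simp [idxsI, hx, List.count_cons, ih]

theorem sorted_idxsI (xs : List String) (s : Int) (c : String) :
    (idxsI xs s c).Pairwise (· < ·) := by
  induction xs generalizing s with
  | nil => simp [idxsI]
  | cons x t ih =>
    simp only [idxsI]
    rw [List.pairwise_append]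
    refine ⟨?_, ih (s + 1), ?_⟩
    · split_ifs <;> simp
    · intro a ha b hb
      have hb' := (mem_idxsI t (s + 1) c b).mp hb
      obtain ⟨k, _, rfl, _⟩ := hb'
      have ha' : a = s := by split_ifs at ha <;> simpa using ha
      omega

theorem head_idxsI (xs : List String) (s : Int) (c : String) :
    (idxsI xs s c).head? = (xs.findIdx? (fun x => x == c)).map (fun j : Nat => s + (j : Int)) := by
  induction xs generalizing s with
  | nil => rfl
  | cons x t ih =>
    simp only [idxsI, List.findIdx?_cons]
    by_cases hx : (x == c) = true
    · simp [hx]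
    · rw [if_neg hx, if_neg (by simp [hx]), List.nil_append, ih]
      cases t.findIdx? (fun x => x == c) with
      | none => rfl
      | some j =>
        simp only [Option.map_some]
        congr 1
        push_cast
        ring

theorem idxsI_append (xs ys : List String) (s : Int) (c : String) :
    idxsI (xs ++ ys) s c = idxsI xs s c ++ idxsI ys (s + xs.length) c := by
  induction xs generalizing s with
  | nil => simp [idxsI]
  | cons x t ih =>
    simp only [List.cons_append, idxsI, ih, List.append_assoc, List.length_cons]
    congr 2
    push_cast
    ring

theorem last_idxsI (xs : List String) (c : String) :
    (idxsI xs 0 c).getLast? =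
      (xs.reverse.findIdx? (fun x => x == c)).map (fun j : Nat => ((xs.length - 1 - j : Nat) : Int)) := by
  induction xs using List.reverseRecOn with
  | nil => rfl
  | append_singleton t x ih =>
    rw [idxsI_append, List.reverse_append]
    simp only [List.reverse_singleton, List.singleton_append, List.findIdx?_cons]
    by_cases hx : (x == c) = true
    · rw [if_pos hx]
      have h1 : idxsI [x] (0 + (t.length : Int)) c = [(t.length : Int)] := by
        simp [idxsI, hx]
      rw [h1, List.getLast?_concat]
      simp
    · rw [if_neg hx]
      have h1 : idxsI [x] (0 + (t.length : Int)) c = [] := by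
        simp [idxsI, hx]
      rw [h1, List.append_nil, ih]
      cases t.reverse.findIdx? (fun x => x == c) with
      | none => rfl
      | some j =>
        simp only [Option.map_some]
        congr 1
        simp only [List.length_append, List.length_singleton]
        congr 1
        omega

-- shift: positions from offset s are positions from 0 shifted by s
theorem idxsI_shift_gen (xs : List String) (c : String) (s1 : Int) :
    ∀ s2 : Int, idxsI xs (s1 + s2) c = (idxsI xs s2 c).map (fun p => p + s1) := by
  induction xs with
  | nil => intro s2; simp [idxsI]
  | cons x t ih =>
    intro s2
    simp only [idxsI, List.map_append]
    congr 1
    · split_ifs <;> simp [add_comm]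
    · rw [show s1 + s2 + 1 = s1 + (s2 + 1) by ring, ih (s2 + 1)]

theorem filter_lt_idxsI (xs : List String) (c : String) :
    ∀ m : Nat, m ≤ xs.length →
      ((idxsI xs 0 c).filter (fun p => decide (p < (m : Int)))).length = (xs.take m).count c := by
  induction xs with
  | nil => intro m _; simp [idxsI]
  | cons x t ih =>
    intro m hm
    have hshift : idxsI t 1 c = (idxsI t 0 c).map (fun p => p + 1) := by
      have := idxsI_shift_gen t c 1 0
      simpa using this
    cases m with
    | zero =>
      simp only [List.take_zero, List.count_nil]
      rw [List.length_eq_zero_iff]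
      rw [List.filter_eq_nil_iff]
      intro p hp
      rcases (mem_idxsI (x :: t) 0 c p).mp hp with ⟨k, _, rfl, _⟩
      simp only [decide_eq_true_eq]
      omega
    | succ m =>
      have hm' : m ≤ t.length := by simpa using hm
      simp only [idxsI, zero_add, hshift, List.filter_append, List.length_append,
        List.take_succ_cons, List.count_cons]
      have h1 : ((if x == c then [(0 : Int)] else []).filter
          (fun p => decide (p < ((m + 1 : Nat) : Int)))).length = if x == c then 1 else 0 := by
        split_ifs with h
        · simp
        · simp
      have h2 : (((idxsI t 0 c).map (fun p => p + 1)).filter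
            (fun p => decide (p < ((m + 1 : Nat) : Int)))).length
          = ((idxsI t 0 c).filter (fun p => decide (p < (m : Int)))).length := by
        rw [List.filter_map, List.length_map]
        congr 1
        apply List.filter_congr
        intro p _
        simp only [Function.comp_apply, decide_eq_decide]
        push_cast
        omega
      rw [h1, h2, ih m hm']
      split_ifs <;> omega

-- sorted access: strictly increasing list, getD order
theorem pairwise_getD_lt (a : List Int) (hs : a.Pairwise (· < ·)) (i j : Nat)
    (hij : i < j) (hj : j < a.length) : a.getD i 0 < a.getD j 0 := by
  rw [List.getD_eq_getElem _ _ (by omega), List.getD_eq_getElem _ _ hj]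
  exact List.pairwise_iff_getElem.mp hs i j (by omega) hj hij

-- binary-search invariant
theorem ltGo_spec (a : List Int) (x : Int) (hs : a.Pairwise (· < ·)) :
    ∀ (n lo hi : Nat), hi - lo ≤ n → lo ≤ hi → hi ≤ a.length →
      (∀ i, i < lo → a.getD i 0 < x) →
      (∀ i, hi ≤ i → i < a.length → ¬ a.getD i 0 < x) →
      (∀ i, i < ltGo a x lo hi → a.getD i 0 < x) ∧
      (∀ i, ltGo a x lo hi ≤ i → i < a.length → ¬ a.getD i 0 < x) ∧
      ltGo a x lo hi ≤ a.length := by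
  intro n
  induction n with
  | zero =>
    intro lo hi hfuel hlohi hhi hlow hhigh
    have heq : lo = hi := by omega
    rw [ltGo, dif_neg (by omega)]
    exact ⟨hlow, by subst heq; exact hhigh, by omega⟩
  | succ n ih =>
    intro lo hi hfuel hlohi hhi hlow hhigh
    rw [ltGo]
    by_cases h : lo < hi
    · rw [dif_pos h]
      set mid := (lo + hi) / 2 with hmid
      have hmlt : mid < hi := by omega
      have hmge : lo ≤ mid := by omega
      by_cases hx : a.getD mid 0 < x
      · rw [if_pos hx]
        refine ih (mid + 1) hi (by omega) (by omega) hhi ?_ hhigh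
        intro i hi'
        rcases Nat.lt_or_ge i mid with h1 | h1
        · exact lt_trans (pairwise_getD_lt a hs i mid h1 (by omega)) hx
        · have : i = mid := by omega
          rwa [this]
      · rw [if_neg hx]
        refine ih lo mid (by omega) (by omega) (by omega) hlow ?_
        intro i hi1 hi2
        rcases Nat.lt_or_ge mid i with h1 | h1
        · intro hcon
          exact hx (lt_trans (pairwise_getD_lt a hs mid i h1 hi2) hcon)
        · have : i = mid := by omega
          rwa [this]
    · rw [dif_neg h]
      have heq : lo = hi := by omega
      exact ⟨hlow, by subst heq; exact hhigh, by omega⟩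

theorem ltCount_eq (a : List Int) (x : Int) (hs : a.Pairwise (· < ·)) :
    ltCount a x = (a.filter (fun p => decide (p < x))).length := by
  obtain ⟨h1, h2, h3⟩ := ltGo_spec a x hs a.length 0 a.length (by omega) (by omega) le_rfl
    (by omega) (by intro i h1 h2; omega)
  set l := ltGo a x 0 a.length with hl
  show l = _
  rw [← List.countP_eq_length_filter]
  conv_rhs => rw [← List.take_append_drop l a, List.countP_append]
  have hTake : (a.take l).countP (fun p => decide (p < x)) = l := by
    have hall : ∀ b ∈ a.take l, (fun p => decide (p < x)) b = true := by
      intro b hb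
      obtain ⟨i, hi, rfl⟩ := List.mem_iff_getElem.mp hb
      rw [List.getElem_take]
      have hil : i < l := by
        have := hi
        simp only [List.length_take] at this
        omega
      have := h1 i hil
      rw [List.getD_eq_getElem _ _ (by omega)] at this
      simpa using this
    rw [List.countP_eq_length.mpr hall]
    simp only [List.length_take]
    omega
  have hDrop : (a.drop l).countP (fun p => decide (p < x)) = 0 := by
    rw [List.countP_eq_zero]
    intro b hb
    obtain ⟨i, hi, rfl⟩ := List.mem_iff_getElem.mp hb
    rw [List.getElem_drop]
    have hlen : (a.drop l).length = a.length - l := by simp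
    have := h2 (l + i) (by omega) (by omega)
    rw [List.getD_eq_getElem _ _ (by omega)] at this
    simpa using this
  rw [hTake, hDrop]
  omega

-- the enumerate fold builds exactly the two position lists
theorem fold_pos (xs : List String) : ∀ (s : Int) (accB accR : List Int),
    (PySem.List.enumerate xs s).foldl
      (fun (acc : List Int × List Int) p =>
        if p.2 == "B" then (acc.1 ++ [p.1], acc.2)
        else if p.2 == "R" then (acc.1, acc.2 ++ [p.1])
        else acc) (accB, accR)
    = (accB ++ idxsI xs s "B", accR ++ idxsI xs s "R") := by
  induction xs with
  | nil => intro s accB accR; simp [idxsI, PySem.List.enumerate_nil]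
  | cons x t ih =>
    intro s accB accR
    rw [PySem.List.enumerate_cons, List.foldl_cons]
    by_cases hB : (x == "B") = true
    · have hR : (x == "R") = false := by
        have : x = "B" := by simpa using hB
        simp [this]
      simp only [hB, hR, if_true, if_false, Bool.false_eq_true]
      rw [ih (s + 1)]
      simp [idxsI, hB, hR, List.append_assoc]
    · by_cases hR : (x == "R") = true
      · simp only [hB, hR, if_true, if_false, Bool.false_eq_true]
        rw [ih (s + 1)]
        simp [idxsI, hB, hR, List.append_assoc]
      · simp only [hB, hR, if_false, Bool.false_eq_true]
        rw [ih (s + 1)]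
        simp [idxsI, hB, hR]

-- candidate resA (opposite balls left of last c) agrees with A's right-push count
theorem candA_eq (xs : List String) (c o : String) (hco : c ≠ o) :
    (match (idxsI xs 0 c).getLast? with
      | none => (0 : Int)
      | some lb => (ltCount (idxsI xs 0 o) lb : Int))
    = (match xs.reverse.findIdx? (fun y => y == c) with
      | none => (0 : Int)
      | some j => ((xs.reverse.drop j).count o : Int)) := by
  rw [last_idxsI]
  cases hfi : xs.reverse.findIdx? (fun y => y == c) with
  | none => rfl
  | some j =>
    simp only [Option.map_some]
    set n := xs.length with hn
    have hj : j < n := by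
      have := (List.findIdx?_eq_some_iff_findIdx_eq.mp hfi).1
      simp [hn] at this ⊢
      omega
    -- xs[n-1-j] = c
    have hrevlen : xs.reverse.length = n := by simp [hn]
    have hjc : xs[n - 1 - j]'(by omega) = c := by
      have hp := List.of_findIdx?_eq_some hfi
      rw [List.getElem?_eq_getElem (by omega : j < xs.reverse.length)] at hp
      have : xs.reverse[j]'(by omega) = c := by simpa using hp
      rwa [List.getElem_reverse] at this
    have hsorted := sorted_idxsI xs 0 o
    rw [ltCount_eq _ _ hsorted]
    -- replace the strict bound n-1-j by n-j using lb ∉ posO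
    have hnotmem : ((n - 1 - j : Nat) : Int) ∉ idxsI xs 0 o := by
      intro hmem
      rcases (mem_idxsI xs 0 o _).mp hmem with ⟨k, hk, hke, hko⟩
      have : k = n - 1 - j := by omega
      subst this
      rw [List.getD_eq_getElem _ _ (by omega)] at hko
      exact hco (hjc ▸ hko ▸ rfl)
    have hswap : (idxsI xs 0 o).filter (fun p => decide (p < ((n - 1 - j : Nat) : Int)))
        = (idxsI xs 0 o).filter (fun p => decide (p < ((n - j : Nat) : Int))) := by
      apply List.filter_congr
      intro p hp
      have hpne : p ≠ ((n - 1 - j : Nat) : Int) := fun h => hnotmem (h ▸ hp)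
      simp only [decide_eq_decide]
      omega
    rw [hswap, filter_lt_idxsI xs o (n - j) (by omega)]
    -- A side: (xs.reverse.drop j).count o = (xs.take (n-j)).count o
    have hrt : (xs.take (n - j)).reverse = xs.reverse.drop j := by
      rw [List.reverse_take]
      congr 1
      omega
    rw [← hrt, List.count_reverse]

-- candidate resB (c balls right of first opposite) agrees with A's left-push count
theorem candB_eq (xs : List String) (c o : String) :
    (match (idxsI xs 0 o).head? with
      | none => (0 : Int)
      | some f => ((idxsI xs 0 c).length : Int) - (ltCount (idxsI xs 0 c) f : Int))
    = (match xs.findIdx? (fun y => y == o) with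
      | none => (0 : Int)
      | some j => ((xs.drop j).count c : Int)) := by
  rw [head_idxsI]
  cases hfi : xs.findIdx? (fun y => y == o) with
  | none => rfl
  | some j =>
    simp only [Option.map_some, zero_add]
    have hj : j < xs.length := (List.findIdx?_eq_some_iff_findIdx_eq.mp hfi).1
    have hsorted := sorted_idxsI xs 0 c
    rw [ltCount_eq _ _ hsorted, filter_lt_idxsI xs c j (by omega), length_idxsI]
    have hsplit : xs.count c = (xs.take j).count c + (xs.drop j).count c := by
      conv_lhs => rw [← List.take_append_drop j xs]
      rw [List.count_append]
    rw [hsplit]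
    push_cast
    ring

-- ===== VERDICT (by name: the statement is the Claim_ definition above) =====
theorem solve_spec : Claim_equal_solve := by
  intro N ball _ hpre
  unfold Spec_solve
  rw [solve_unfold]
  by_cases h0 : 0 < N
  · have h0' : (0 : Int) ≤ N := le_of_lt h0
    set xs := ball.take N.toNat with hxs
    have hB : solve_alt N ball =
        min (min (min (min ((10 : Int) ^ 8)
            (match (idxsI xs 0 "B").getLast? with
              | none => (0 : Int) | some lb => (ltCount (idxsI xs 0 "R") lb : Int)))
            (match (idxsI xs 0 "R").head? with
              | none => (0 : Int)
              | some f => ((idxsI xs 0 "B").length : Int) - (ltCount (idxsI xs 0 "B") f : Int)))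
            (match (idxsI xs 0 "R").getLast? with
              | none => (0 : Int) | some lb => (ltCount (idxsI xs 0 "B") lb : Int)))
          (match (idxsI xs 0 "B").head? with
            | none => (0 : Int)
            | some f => ((idxsI xs 0 "R").length : Int) - (ltCount (idxsI xs 0 "R") f : Int)) := by
      simp only [solve_alt]
      rw [if_pos h0, PySem.List.slice_to ball h0', ← hxs, fold_pos xs 0 [] []]
      simp
    rw [hB]
    rw [rightA_char ball N "B" "R" h0' hpre, rightA_char ball N "R" "B" h0' hpre,
      leftA_char ball N "B" "R" h0' hpre, leftA_char ball N "R" "B" h0' hpre, ← hxs]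
    rw [candA_eq xs "B" "R" (by decide), candA_eq xs "R" "B" (by decide),
      candB_eq xs "B" "R", candB_eq xs "R" "B"]
  · -- N ≤ 0: every scan and every position list is empty; both sides are 0
    have hN' : N ≤ 0 := by omega
    have hA0 : ∀ c o : String, leftA ball N c o = 0 := by
      intro c o
      unfold leftA
      rw [PySem.List.pyRange_one_eq_nil hN']
      rfl
    have hA1 : ∀ c o : String, rightA ball N c o = 0 := by
      intro c o
      unfold rightA
      rw [PySem.List.pyRange_neg_one_eq_nil (by omega : N - 1 ≤ -1)]
      rfl
    have hB : solve_alt N ball = min (min (min (min ((10 : Int) ^ 8) 0) 0) 0) 0 := by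
      simp only [solve_alt]
      rw [if_neg h0]
      simp [PySem.List.enumerate_nil]
    rw [hA0, hA0, hA1, hA1, hB]
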